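-- pv_equiv track=rewrite | github.com/Sky-Nik/BinarySearch-YT | Bit Manipulation/Minimum-Updates-to-Make-Bitwise-OR-Equal-to-Target.py | solve
-- ===== SOURCE A (Python) =====
-- def solve(first, second, target):
--   def cost(first_bit, second_bit, target_bit):
--     if first_bit and second_bit and not target_bit:
--       return 2
--     if ((first_bit or second_bit) and not target_bit) or \
--         (not first_bit and not second_bit and target_bit):
--       return 1
--     return 0
--
--   return sum(cost(first & (1 << bit), second & (1 << bit), target & (1 << bit)) for bit in range(30))
-- ===== SOURCE B (Python) =====
-- def solve(first, second, target):
--     mask = (1 << 30) - 1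
--     return (bin(first & ~target & mask).count('1')
--             + bin(second & ~target & mask).count('1')
--             + bin(target & ~(first | second) & mask).count('1'))
-- ===== Notes on version B (the rewrite author's own statement) =====
-- stated objective: simpler
-- what changed: Replaced the 30-iteration per-bit loop with a nested cost helper by a closed-form sum of three population counts (bits to clear in each operand plus bits to set), masked to bits 0..29.
import Mathlib
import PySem

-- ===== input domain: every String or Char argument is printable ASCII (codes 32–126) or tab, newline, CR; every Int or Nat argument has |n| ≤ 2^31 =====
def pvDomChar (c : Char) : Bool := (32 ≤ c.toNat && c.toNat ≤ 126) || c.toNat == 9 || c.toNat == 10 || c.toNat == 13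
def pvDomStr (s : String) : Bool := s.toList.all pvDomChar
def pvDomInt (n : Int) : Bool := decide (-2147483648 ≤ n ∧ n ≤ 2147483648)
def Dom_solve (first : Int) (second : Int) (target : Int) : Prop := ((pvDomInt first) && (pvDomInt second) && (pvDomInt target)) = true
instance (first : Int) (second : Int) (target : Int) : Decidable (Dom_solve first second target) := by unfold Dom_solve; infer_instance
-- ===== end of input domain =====

-- B replaces A's 30-iteration per-bit loop (with a nested cost helper) by a closed-form sum of
-- three population counts over bits 0..29; objective: simpler.


-- ===== PORT A =====
-- A's nested 'cost' helper; Python truthiness of an int is '≠ 0'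
def cost (first_bit : Int) (second_bit : Int) (target_bit : Int) : Int :=
  if first_bit ≠ 0 ∧ second_bit ≠ 0 ∧ ¬ target_bit ≠ 0 then 2
  else if ((first_bit ≠ 0 ∨ second_bit ≠ 0) ∧ ¬ target_bit ≠ 0) ∨
          (¬ first_bit ≠ 0 ∧ ¬ second_bit ≠ 0 ∧ target_bit ≠ 0) then 1
  else 0

-- sum(cost(first & (1 << bit), …) for bit in range(30)); bit ∈ [0,30) so '.toNat' is exact here
def solve (first : Int) (second : Int) (target : Int) : Int :=
  ((PySem.List.pyRange 0 30 1).map (fun bit =>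
    cost (PySem.Int.band first ((1:Int) <<< bit.toNat))
         (PySem.Int.band second ((1:Int) <<< bit.toNat))
         (PySem.Int.band target ((1:Int) <<< bit.toNat)))).sum

-- ===== PORT B =====
-- bin(x).count('1') on the (nonnegative) masked values is exactly the popcount PySem.Int.bitCount
def solve_alt (first : Int) (second : Int) (target : Int) : Int :=
  let mask : Int := (1 <<< 30) - 1
  (PySem.Int.bitCount (PySem.Int.band (PySem.Int.band first (Int.not target)) mask) : Int)
  + (PySem.Int.bitCount (PySem.Int.band (PySem.Int.band second (Int.not target)) mask) : Int)
  + (PySem.Int.bitCount (PySem.Int.band (PySem.Int.band target (Int.not (PySem.Int.bor first second))) mask) : Int)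

-- ===== PRECONDITION & SPEC =====
def Spec_solve (first : Int) (second : Int) (target : Int) (out : Int) : Prop := out = solve_alt first second target
instance (first : Int) (second : Int) (target : Int) (out : Int) : Decidable (Spec_solve first second target out) := by unfold Spec_solve; infer_instance

-- ===== CLAIM (what is proved, stated in full; the proofs are below) =====
def Claim_equal_solve : Prop := ∀ (first : Int) (second : Int) (target : Int), Dom_solve first second target → Spec_solve first second target (solve first second target)

-- ===== LEMMAS AND PROOFS =====

theorem fdiv_negSucc (m : Nat) : PySem.Int.floordiv (-(m:Int) - 1) 2 = -((m/2 : Nat) : Int) - 1 := by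
  rw [PySem.Int.floordiv_eq_iff_of_pos (by norm_num)]; push_cast; omega
theorem fdiv_natCast (m : Nat) : PySem.Int.floordiv ((m:Int)) 2 = ((m/2 : Nat) : Int) := by
  exact_mod_cast PySem.Int.floordiv_natCast m 2
theorem int_rep (a : Int) : (∃ m : Nat, a = (m:Int)) ∨ (∃ m : Nat, a = -(m:Int) - 1) := by
  cases a with
  | ofNat m => exact Or.inl ⟨m, rfl⟩
  | negSucc m => exact Or.inr ⟨m, by simp [Int.negSucc_eq]; ring⟩
theorem band_pn (m n : Nat) : PySem.Int.band (m:Int) (-(n:Int)-1) = ((m - (m &&& n) : Nat) : Int) := by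
  simp only [PySem.Int.band]; split_ifs <;> first | omega | simp
theorem band_np (m n : Nat) : PySem.Int.band (-(m:Int)-1) (n:Int) = ((n - (n &&& m) : Nat) : Int) := by
  simp only [PySem.Int.band]; split_ifs <;> first | omega | simp
theorem band_nn (m n : Nat) : PySem.Int.band (-(m:Int)-1) (-(n:Int)-1) = -((m ||| n : Nat):Int) - 1 := by
  simp only [PySem.Int.band]; split_ifs <;> first | omega | simp
theorem bor_pp (m n : Nat) : PySem.Int.bor (m:Int) (n:Int) = ((m ||| n : Nat) : Int) := by
  simp only [PySem.Int.bor]; split_ifs <;> first | omega | simp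
theorem bor_pn (m n : Nat) : PySem.Int.bor (m:Int) (-(n:Int)-1) = -((n - (n &&& m) : Nat) : Int) - 1 := by
  simp only [PySem.Int.bor]; split_ifs <;> first | omega | simp
theorem bor_np (m n : Nat) : PySem.Int.bor (-(m:Int)-1) (n:Int) = -((m - (m &&& n) : Nat) : Int) - 1 := by
  simp only [PySem.Int.bor]; split_ifs <;> first | omega | simp
theorem bor_nn (m n : Nat) : PySem.Int.bor (-(m:Int)-1) (-(n:Int)-1) = -((m &&& n : Nat):Int) - 1 := by
  simp only [PySem.Int.bor]; split_ifs <;> first | omega | simp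

theorem nat_sub_and_div_two (m n : Nat) : (m - (m &&& n))/2 = m/2 - (m/2 &&& n/2) := by
  have h1 : m &&& n ≤ m := Nat.and_le_left
  have h2 : (m &&& n) % 2 = 1 → m % 2 = 1 := by
    intro h; exact ((Nat.and_mod_two_eq_one ..).mp h).1
  have h3 : (m &&& n)/2 = m/2 &&& n/2 := Nat.and_div_two
  omega

theorem fdiv_band (a b : Int) :
    PySem.Int.floordiv (PySem.Int.band a b) 2 =
      PySem.Int.band (PySem.Int.floordiv a 2) (PySem.Int.floordiv b 2) := by
  rcases int_rep a with ⟨m, rfl⟩ | ⟨m, rfl⟩ <;> rcases int_rep b with ⟨n, rfl⟩ | ⟨n, rfl⟩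
  · rw [PySem.Int.band_natCast, fdiv_natCast, fdiv_natCast, fdiv_natCast, PySem.Int.band_natCast,
      Nat.and_div_two]
  · rw [band_pn, fdiv_natCast, fdiv_natCast, fdiv_negSucc, band_pn, nat_sub_and_div_two]
  · rw [band_np, fdiv_natCast, fdiv_negSucc, fdiv_natCast, band_np, nat_sub_and_div_two]
  · rw [band_nn, fdiv_negSucc, fdiv_negSucc, fdiv_negSucc, band_nn, Nat.or_div_two]

theorem fdiv_bor (a b : Int) :
    PySem.Int.floordiv (PySem.Int.bor a b) 2 =
      PySem.Int.bor (PySem.Int.floordiv a 2) (PySem.Int.floordiv b 2) := by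
  rcases int_rep a with ⟨m, rfl⟩ | ⟨m, rfl⟩ <;> rcases int_rep b with ⟨n, rfl⟩ | ⟨n, rfl⟩
  · rw [bor_pp, fdiv_natCast, fdiv_natCast, fdiv_natCast, bor_pp, Nat.or_div_two]
  · rw [bor_pn, fdiv_negSucc, fdiv_natCast, fdiv_negSucc, bor_pn, nat_sub_and_div_two]
  · rw [bor_np, fdiv_negSucc, fdiv_negSucc, fdiv_natCast, bor_np, nat_sub_and_div_two]
  · rw [bor_nn, fdiv_negSucc, fdiv_negSucc, fdiv_negSucc, bor_nn, Nat.and_div_two]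

theorem nat_and_mod2 (m n : Nat) : (m &&& n) % 2 = 1 ↔ (m % 2 = 1 ∧ n % 2 = 1) := by
  simp [Nat.and_mod_two_eq_one]
theorem nat_or_mod2 (m n : Nat) : (m ||| n) % 2 = 1 ↔ (m % 2 = 1 ∨ n % 2 = 1) := by
  simp [Nat.or_mod_two_eq_one]

theorem emod2_band (a b : Int) : (PySem.Int.band a b) % 2 = 1 ↔ (a % 2 = 1 ∧ b % 2 = 1) := by
  rcases int_rep a with ⟨m, rfl⟩ | ⟨m, rfl⟩ <;> rcases int_rep b with ⟨n, rfl⟩ | ⟨n, rfl⟩ <;>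
    [rw [PySem.Int.band_natCast]; rw [band_pn]; rw [band_np]; rw [band_nn]] <;>
    · have h1 := nat_and_mod2 m n
      have h2 : m &&& n ≤ m := Nat.and_le_left
      have h3 : m &&& n ≤ n := Nat.and_le_right
      have h4 := nat_or_mod2 m n
      have h5 := nat_and_mod2 n m
      have h6 : n &&& m ≤ n := Nat.and_le_left
      have h7 : n &&& m ≤ m := Nat.and_le_right
      omega

theorem emod2_bor (a b : Int) : (PySem.Int.bor a b) % 2 = 1 ↔ (a % 2 = 1 ∨ b % 2 = 1) := by
  rcases int_rep a with ⟨m, rfl⟩ | ⟨m, rfl⟩ <;> rcases int_rep b with ⟨n, rfl⟩ | ⟨n, rfl⟩ <;>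
    [rw [bor_pp]; rw [bor_pn]; rw [bor_np]; rw [bor_nn]] <;>
    · have h1 := nat_and_mod2 m n
      have h2 : m &&& n ≤ m := Nat.and_le_left
      have h3 : m &&& n ≤ n := Nat.and_le_right
      have h4 := nat_or_mod2 m n
      have h5 := nat_and_mod2 n m
      have h6 : n &&& m ≤ n := Nat.and_le_left
      have h7 : n &&& m ≤ m := Nat.and_le_right
      omega

theorem int_not_eq (a : Int) : Int.not a = -a - 1 := by
  cases a <;> (simp [Int.not]; try omega)

theorem fdiv_not (a : Int) : PySem.Int.floordiv (Int.not a) 2 = Int.not (PySem.Int.floordiv a 2) := by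
  rw [int_not_eq, int_not_eq, PySem.Int.floordiv_eq_iff_of_pos (by norm_num)]
  have h1 := PySem.Int.floordiv_mul_add_mod a 2
  have h2 := PySem.Int.mod_nonneg a (b := 2) (by norm_num)
  have h3 := PySem.Int.mod_lt a (b := 2) (by norm_num)
  omega

theorem shiftLeft_int (n : Nat) : (1:Int) <<< n = 2 ^ n := by
  simp [Int.shiftLeft_eq]

theorem band_two_pow_succ (a : Int) (i : Nat) :
    PySem.Int.band a ((1:Int) <<< (i+1)) = 2 * PySem.Int.band (PySem.Int.floordiv a 2) ((1:Int) <<< i) := by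
  rw [shiftLeft_int, shiftLeft_int]
  have hb : ((2:Int) ^ (i+1)) % 2 = 0 := by rw [pow_succ]; exact Int.mul_emod_left _ _
  have hmod : (PySem.Int.band a (2 ^ (i+1))) % 2 = 0 := by
    have h := emod2_band a (2 ^ (i+1))
    omega
  have hdiv := fdiv_band a (2 ^ (i+1))
  have h2 : PySem.Int.floordiv ((2:Int) ^ (i+1)) 2 = 2 ^ i := by
    rw [PySem.Int.floordiv_eq_ediv_of_pos (by norm_num), pow_succ, Int.mul_ediv_cancel _ (by norm_num)]
  have h3 : PySem.Int.floordiv (PySem.Int.band a (2 ^ (i+1))) 2 = (PySem.Int.band a (2 ^ (i+1))) / 2 :=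
    PySem.Int.floordiv_eq_ediv_of_pos (by norm_num)
  rw [h2] at hdiv
  omega

theorem bitCount_rec (c : Int) (h : 0 ≤ c) :
    (PySem.Int.bitCount c : Int) = c % 2 + (PySem.Int.bitCount (PySem.Int.floordiv c 2) : Int) := by
  rcases eq_or_lt_of_le h with heq | hpos
  · rw [← heq]
    decide
  · rw [PySem.Int.bitCount_of_pos hpos, PySem.Int.mod_eq_emod_of_pos (by norm_num)]
    have : 0 ≤ c % 2 := Int.emod_nonneg c (by norm_num)
    push_cast
    omega

theorem mask_fdiv (k : Nat) : PySem.Int.floordiv (((1:Int) <<< (k+1)) - 1) 2 = ((1:Int) <<< k) - 1 := by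
  rw [shiftLeft_int, shiftLeft_int, PySem.Int.floordiv_eq_ediv_of_pos (by norm_num), pow_succ]
  have h : (0:Int) < 2 ^ k := by positivity
  omega

theorem mask_odd (k : Nat) : (((1:Int) <<< (k+1)) - 1) % 2 = 1 := by
  rw [shiftLeft_int, pow_succ]
  have h : (0:Int) < 2 ^ k := by positivity
  omega

theorem popcount_step (c : Int) (k : Nat) :
    (PySem.Int.bitCount (PySem.Int.band c (((1:Int) <<< (k+1)) - 1)) : Int)
      = (if c % 2 = 1 then 1 else 0)
        + (PySem.Int.bitCount (PySem.Int.band (PySem.Int.floordiv c 2) (((1:Int) <<< k) - 1)) : Int) := by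
  have hm : (0:Int) ≤ ((1:Int) <<< (k+1)) - 1 := by
    rw [shiftLeft_int]; have : (0:Int) < 2 ^ (k+1) := by positivity
    omega
  have hnn : 0 ≤ PySem.Int.band c (((1:Int) <<< (k+1)) - 1) := by
    rw [PySem.Int.band_comm]; exact PySem.Int.band_nonneg_of_nonneg_left c hm
  rw [bitCount_rec _ hnn, fdiv_band, mask_fdiv]
  have hpar := emod2_band c (((1:Int) <<< (k+1)) - 1)
  have hodd := mask_odd k
  have hb : 0 ≤ (PySem.Int.band c (((1:Int) <<< (k+1)) - 1)) % 2 := Int.emod_nonneg _ (by norm_num)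
  have hb2 : (PySem.Int.band c (((1:Int) <<< (k+1)) - 1)) % 2 < 2 := Int.emod_lt_of_pos _ (by norm_num)
  split_ifs with h <;> omega

theorem not_emod2 (t : Int) : (Int.not t) % 2 = 1 ↔ ¬ t % 2 = 1 := by
  rw [int_not_eq]; omega

theorem cost_double (x y z : Int) : cost (2*x) (2*y) (2*z) = cost x y z := by
  simp only [cost, mul_ne_zero_iff]
  norm_num

theorem main_lemma (k : Nat) : ∀ (a b t : Int),
    ((List.range k).map (fun (i : Nat) =>
      cost (PySem.Int.band a ((1:Int) <<< i)) (PySem.Int.band b ((1:Int) <<< i))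
           (PySem.Int.band t ((1:Int) <<< i)))).sum =
    (PySem.Int.bitCount (PySem.Int.band (PySem.Int.band a (Int.not t)) (((1:Int) <<< k) - 1)) : Int)
    + (PySem.Int.bitCount (PySem.Int.band (PySem.Int.band b (Int.not t)) (((1:Int) <<< k) - 1)) : Int)
    + (PySem.Int.bitCount (PySem.Int.band (PySem.Int.band t (Int.not (PySem.Int.bor a b))) (((1:Int) <<< k) - 1)) : Int) := by
  induction k with
  | zero =>
    intro a b t
    simp [PySem.Int.band_zero]
  | succ k ih =>
    intro a b t
    rw [List.range_succ_eq_map, List.map_cons, List.map_map, List.sum_cons]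
    simp only [Function.comp_def, Nat.succ_eq_add_one]
    have hmap : ((List.range k).map (fun (i : Nat) =>
        cost (PySem.Int.band a ((1:Int) <<< (i+1))) (PySem.Int.band b ((1:Int) <<< (i+1)))
             (PySem.Int.band t ((1:Int) <<< (i+1))))) = ((List.range k).map (fun (i : Nat) =>
        cost (PySem.Int.band (PySem.Int.floordiv a 2) ((1:Int) <<< i))
             (PySem.Int.band (PySem.Int.floordiv b 2) ((1:Int) <<< i))
             (PySem.Int.band (PySem.Int.floordiv t 2) ((1:Int) <<< i)))) := by
      simp only [band_two_pow_succ, cost_double]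
    rw [hmap, ih]
    rw [popcount_step, popcount_step, popcount_step]
    rw [fdiv_band, fdiv_band, fdiv_band, fdiv_not, fdiv_not, fdiv_bor]
    have e1 : (PySem.Int.band a (Int.not t)) % 2 = 1 ↔ (a % 2 = 1 ∧ ¬ t % 2 = 1) := by
      rw [emod2_band, not_emod2]
    have e2 : (PySem.Int.band b (Int.not t)) % 2 = 1 ↔ (b % 2 = 1 ∧ ¬ t % 2 = 1) := by
      rw [emod2_band, not_emod2]
    have e3 : (PySem.Int.band t (Int.not (PySem.Int.bor a b))) % 2 = 1 ↔ (t % 2 = 1 ∧ ¬ (a % 2 = 1 ∨ b % 2 = 1)) := by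
      rw [emod2_band, not_emod2, emod2_bor]
    have hb1 : ∀ x : Int, PySem.Int.band x ((1:Int) <<< (0:Nat)) = x % 2 := fun x => by
      rw [show ((1:Int) <<< (0:Nat)) = 1 from rfl, PySem.Int.band_one,
        PySem.Int.mod_eq_emod_of_pos (by norm_num)]
    simp only [e1, e2, e3, cost, hb1]
    have h2a := Int.emod_two_eq a
    have h2b := Int.emod_two_eq b
    have h2t := Int.emod_two_eq t
    split_ifs <;> omega

-- ===== VERDICT (by name: the statement is the Claim_ definition above) =====
theorem solve_spec : Claim_equal_solve := by
  intro first second target _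
  show solve first second target = solve_alt first second target
  unfold solve solve_alt
  rw [PySem.List.pyRange_one, List.map_map]
  have hcast : ((30:Int) - 0).toNat = 30 := by decide
  rw [hcast]
  simp only [Function.comp_def, zero_add, Int.toNat_natCast, Int.shiftLeft_natCast_right]
  have hmask : ((↑(1 <<< 30 : Nat) : Int) - 1) = ((1:Int) <<< (30:Nat)) - 1 := by
    norm_num [Int.shiftLeft_eq, Nat.shiftLeft_eq]
  rw [hmask]
  exact main_lemma 30 first second target
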